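-- pv_equiv track=rewrite | github.com/Rapid1898-code/codesignal | arcade/level42.py | bishopAndPawn
-- ===== SOURCE A (Python) =====
-- def bishopAndPawn(bishop, pawn):
--     charNum = ord(bishop[0]) - 96
--     num = bishop[1]
--     bishopFields = []
--
--     tmpNum1 = charNum
--     tmpNum2 = int(num)
--     while True:
--         tmpNum1 -= 1
--         tmpNum2 += 1
--         if tmpNum1 == 0:
--             break
--         bishopFields.append(chr(tmpNum1 + 96) + str(tmpNum2))
--
--     tmpNum1 = charNum
--     tmpNum2 = int(num)
--     while True:
--         tmpNum1 -= 1
--         tmpNum2 -= 1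
--         if tmpNum1 == 0:
--             break
--         bishopFields.append(chr(tmpNum1 + 96) + str(tmpNum2))
--
--     tmpNum1 = charNum
--     tmpNum2 = int(num)
--     while True:
--         tmpNum1 += 1
--         tmpNum2 += 1
--         if tmpNum1 == 9:
--             break
--         bishopFields.append(chr(tmpNum1 + 96) + str(tmpNum2))
--
--     tmpNum1 = charNum
--     tmpNum2 = int(num)
--     while True:
--         tmpNum1 += 1
--         tmpNum2 -= 1
--         if tmpNum1 == 9:
--             break
--         bishopFields.append(chr(tmpNum1 + 96) + str(tmpNum2))
--
--     if pawn in bishopFields: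
--         return True
--     else:
--         return False
-- ===== SOURCE B (Python) =====
-- def bishopAndPawn(bishop, pawn):
--     r = int(bishop[1])
--     if not pawn or not ('a' <= pawn[0] <= 'h') or pawn[0] == bishop[0]:
--         return False
--     dc = abs(ord(pawn[0]) - ord(bishop[0]))
--     return pawn[1:] == str(r + dc) or pawn[1:] == str(r - dc)
-- ===== Notes on version B (the rewrite author's own statement) =====
-- stated objective: simpler
-- what changed: A generates all diagonal squares with four while-loops and tests list membership; B parses the two squares into column/row numbers and decides the attack with a single closed-form comparison (|column difference| equals the row offset written in the pawn string), no list is built.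
import Mathlib
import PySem

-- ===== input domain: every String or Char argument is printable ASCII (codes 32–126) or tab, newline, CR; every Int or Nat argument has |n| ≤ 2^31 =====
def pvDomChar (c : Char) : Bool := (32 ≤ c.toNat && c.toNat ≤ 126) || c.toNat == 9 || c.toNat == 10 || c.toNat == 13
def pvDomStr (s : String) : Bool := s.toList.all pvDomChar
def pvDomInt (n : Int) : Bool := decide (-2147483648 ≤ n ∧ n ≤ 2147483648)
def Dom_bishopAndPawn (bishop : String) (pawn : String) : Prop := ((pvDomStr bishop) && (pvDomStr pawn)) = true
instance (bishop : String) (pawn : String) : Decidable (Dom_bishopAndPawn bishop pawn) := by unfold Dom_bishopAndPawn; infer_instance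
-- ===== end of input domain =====

-- B replaces A's four diagonal-generation loops + list membership by a closed-form
-- parse-and-compare predicate (same return value on all inputs admitted by Pre_).


-- ===== PORT A =====
-- chr(a + 96) + str(b)  as a list of chars (string concat/compare is char-list concat/compare)
def pvSq (a b : Int) : List Char := Char.ofNat (a + 96).toNat :: PySem.Int.toChars b

-- one of A's four `while True: t1 += d1; t2 += d2; if t1 == stop: break; append(...)` loops;
-- the fuel argument only makes the recursion total: under Pre_ the stop test fires within 9 steps
def pvLoopA (fuel : Nat) (d1 d2 stop : Int) (t1 t2 : Int) (acc : List (List Char)) : List (List Char) :=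
  match fuel with
  | 0 => acc
  | f+1 =>
    let t1' := t1 + d1
    let t2' := t2 + d2
    if t1' = stop then acc
    else pvLoopA f d1 d2 stop t1' t2' (acc ++ [pvSq t1' t2'])

def bishopAndPawn (bishop : String) (pawn : String) : Bool :=
  match PySem.Str.pyGet? bishop 0, PySem.Str.pyGet? bishop 1 with
  | some b0, some num =>
    match PySem.Int.ofChars? [num] with
    | some n =>
      let charNum : Int := (b0.toNat : Int) - 96
      let f1 := pvLoopA 9 (-1) 1 0 charNum n []
      let f2 := pvLoopA 9 (-1) (-1) 0 charNum n f1
      let f3 := pvLoopA 9 1 1 9 charNum n f2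
      let f4 := pvLoopA 9 1 (-1) 9 charNum n f3
      decide (pawn.toList ∈ f4)
    | none => false
  | _, _ => false

-- ===== PORT B =====
def bishopAndPawn_alt (bishop : String) (pawn : String) : Bool :=
  match PySem.Str.pyGet? bishop 1 with
  | none => false
  | some c1 =>
    match PySem.Int.ofChars? [c1] with
    | none => false
    | some r =>
      match pawn.toList with
      | [] => false
      | p0 :: rest =>
        match PySem.Str.pyGet? bishop 0 with
        | none => false
        | some b0 =>
          if ('a' ≤ p0 ∧ p0 ≤ 'h') ∧ p0 ≠ b0 then
            let dc : Int := |(p0.toNat : Int) - (b0.toNat : Int)|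
            decide (rest = PySem.Int.toChars (r + dc)) || decide (rest = PySem.Int.toChars (r - dc))
          else false

-- ===== PRECONDITION & SPEC =====
-- Pre_ = exactly the inputs on which the Python A returns: bishop needs a second character that
-- is a decimal digit (else int(bishop[1]) raises ValueError / IndexError) and a first character
-- in 'a'..'h' (for any other first character at least one of A's four while-loops never hits its
-- stop test and A loops forever).
def Pre_bishopAndPawn (bishop : String) (pawn : String) : Prop :=
  2 ≤ bishop.toList.length ∧ 'a' ≤ bishop.toList.getD 0 'a' ∧
    bishop.toList.getD 0 'a' ≤ 'h' ∧ (bishop.toList.getD 1 '0').isDigit = true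
instance (bishop : String) (pawn : String) : Decidable (Pre_bishopAndPawn bishop pawn) := by
  unfold Pre_bishopAndPawn; infer_instance

def pvWitness_bishopAndPawn : String × String := ("c2", "a4")

def Spec_bishopAndPawn (bishop : String) (pawn : String) (out : Bool) : Prop := out = bishopAndPawn_alt bishop pawn
instance (bishop : String) (pawn : String) (out : Bool) : Decidable (Spec_bishopAndPawn bishop pawn out) := by unfold Spec_bishopAndPawn; infer_instance

-- ===== CLAIM (what is proved, stated in full; the proofs are below) =====
def Claim_equal_bishopAndPawn : Prop := ∀ (bishop : String) (pawn : String), Dom_bishopAndPawn bishop pawn → Pre_bishopAndPawn bishop pawn → Spec_bishopAndPawn bishop pawn (bishopAndPawn bishop pawn)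

-- ===== LEMMAS AND PROOFS =====

lemma char_le_iff (a b : Char) : a ≤ b ↔ a.toNat ≤ b.toNat := by
  rw [Char.le_def]; exact UInt32.le_iff_toNat_le ..

lemma char_eq_iff (a b : Char) : a = b ↔ a.toNat = b.toNat :=
  ⟨fun h => by rw [h], fun h => Char.ext (UInt32.toNat_inj.mp h)⟩

lemma char_toNat_ofNat (n : Nat) (h : n < 55296) : (Char.ofNat n).toNat = n := by
  simp [Char.ofNat, Char.toNat, Nat.isValidChar, h, Char.ofNatAux]

lemma ofChars?_digit (b1 : Char) (h : b1.isDigit = true) :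
    ∃ r : Int, PySem.Int.ofChars? [b1] = some r := by
  have hv : 48 ≤ b1.toNat ∧ b1.toNat ≤ 57 := by
    simp [Char.isDigit, UInt32.le_iff_toNat_le] at h
    exact ⟨h.1, h.2⟩
  have hb : b1 = Char.ofNat b1.toNat := (Char.ofNat_toNat b1).symm
  obtain ⟨lo, hi⟩ := hv
  set n := b1.toNat with hn
  rw [hb]
  clear_value n
  interval_cases n <;> exact ⟨_, rfl⟩

lemma pyGet01 (bishop : String) (b0 b1 : Char) (rest : List Char)
    (h : bishop.toList = b0 :: b1 :: rest) :
    PySem.Str.pyGet? bishop 0 = some b0 ∧ PySem.Str.pyGet? bishop 1 = some b1 := by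
  constructor
  · simp [pysem, h, PySem.List.pyGet?, PySem.List.pyIdx?]
    rw [if_pos (by positivity)]
    simp
  · simp [pysem, h, PySem.List.pyGet?, PySem.List.pyIdx?]

lemma pvLoopA_down_mem (d2 : Int) :
    ∀ (fuel : Nat) (t1 t2 : Int) (acc : List (List Char)) (x : List Char),
    1 ≤ t1 → t1 ≤ (fuel : Int) →
    (x ∈ pvLoopA fuel (-1) d2 0 t1 t2 acc ↔
      x ∈ acc ∨ ∃ k : Int, 1 ≤ k ∧ k ≤ t1 - 1 ∧ x = pvSq (t1 - k) (t2 + d2 * k)) := by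
  intro fuel
  induction fuel with
  | zero => intro t1 t2 acc x h1 h2; exfalso; omega
  | succ f ih =>
    intro t1 t2 acc x h1 h2
    rw [pvLoopA]
    by_cases hstop : t1 + (-1) = 0
    · simp only [hstop, if_pos]
      constructor
      · exact Or.inl
      · rintro (h | ⟨k, hk1, hk2, _⟩)
        · exact h
        · omega
    · simp only [if_neg hstop]
      rw [ih (t1 + -1) (t2 + d2) _ x (by omega) (by omega)]
      simp only [List.mem_append, List.mem_singleton]
      constructor
      · rintro ((h | h) | ⟨k, hk1, hk2, hx⟩)
        · exact Or.inl h
        · refine Or.inr ⟨1, by omega, by omega, ?_⟩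
          rw [h]; congr 1 <;> ring
        · refine Or.inr ⟨k + 1, by omega, by omega, ?_⟩
          rw [hx]; congr 1 <;> ring
      · rintro (h | ⟨k, hk1, hk2, hx⟩)
        · exact Or.inl (Or.inl h)
        · by_cases hk : k = 1
          · subst hk
            refine Or.inl (Or.inr ?_)
            rw [hx]; congr 1 <;> ring
          · refine Or.inr ⟨k - 1, by omega, by omega, ?_⟩
            rw [hx]; congr 1 <;> ring

lemma pvLoopA_up_mem (d2 : Int) :
    ∀ (fuel : Nat) (t1 t2 : Int) (acc : List (List Char)) (x : List Char),
    t1 ≤ 8 → 9 - t1 ≤ (fuel : Int) →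
    (x ∈ pvLoopA fuel 1 d2 9 t1 t2 acc ↔
      x ∈ acc ∨ ∃ k : Int, 1 ≤ k ∧ k ≤ 8 - t1 ∧ x = pvSq (t1 + k) (t2 + d2 * k)) := by
  intro fuel
  induction fuel with
  | zero => intro t1 t2 acc x h1 h2; exfalso; omega
  | succ f ih =>
    intro t1 t2 acc x h1 h2
    rw [pvLoopA]
    by_cases hstop : t1 + 1 = 9
    · simp only [hstop, if_pos]
      constructor
      · exact Or.inl
      · rintro (h | ⟨k, hk1, hk2, _⟩)
        · exact h
        · omega
    · simp only [if_neg hstop]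
      rw [ih (t1 + 1) (t2 + d2) _ x (by omega) (by omega)]
      simp only [List.mem_append, List.mem_singleton]
      constructor
      · rintro ((h | h) | ⟨k, hk1, hk2, hx⟩)
        · exact Or.inl h
        · refine Or.inr ⟨1, by omega, by omega, ?_⟩
          rw [h]; congr 1 <;> ring
        · refine Or.inr ⟨k + 1, by omega, by omega, ?_⟩
          rw [hx]; congr 1 <;> ring
      · rintro (h | ⟨k, hk1, hk2, hx⟩)
        · exact Or.inl (Or.inl h)
        · by_cases hk : k = 1
          · subst hk
            refine Or.inl (Or.inr ?_)
            rw [hx]; congr 1 <;> ring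
          · refine Or.inr ⟨k - 1, by omega, by omega, ?_⟩
            rw [hx]; congr 1 <;> ring

-- membership in the full list built by A's four loops, for a bishop column c ∈ [1,8]
lemma mem_fields (c r : Int) (hc1 : 1 ≤ c) (hc8 : c ≤ 8) (x : List Char) :
    x ∈ pvLoopA 9 1 (-1) 9 c r (pvLoopA 9 1 1 9 c r (pvLoopA 9 (-1) (-1) 0 c r
        (pvLoopA 9 (-1) 1 0 c r []))) ↔
    ∃ c' k : Int, 1 ≤ k ∧ 1 ≤ c' ∧ c' ≤ 8 ∧ (c' = c - k ∨ c' = c + k) ∧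
      (x = pvSq c' (r + k) ∨ x = pvSq c' (r - k)) := by
  rw [pvLoopA_up_mem (-1) 9 c r _ x hc8 (by norm_num; omega),
      pvLoopA_up_mem 1 9 c r _ x hc8 (by norm_num; omega),
      pvLoopA_down_mem (-1) 9 c r _ x hc1 (by norm_num; omega),
      pvLoopA_down_mem 1 9 c r _ x hc1 (by norm_num; omega)]
  simp only [List.not_mem_nil, false_or]
  constructor
  · rintro (((⟨k, h1, h2, hx⟩ | ⟨k, h1, h2, hx⟩) | ⟨k, h1, h2, hx⟩) | ⟨k, h1, h2, hx⟩)
    · exact ⟨c - k, k, by omega, by omega, by omega, Or.inl rfl, Or.inl (by rw [hx]; congr 1 <;> ring)⟩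
    · exact ⟨c - k, k, by omega, by omega, by omega, Or.inl rfl, Or.inr (by rw [hx]; congr 1 <;> ring)⟩
    · exact ⟨c + k, k, by omega, by omega, by omega, Or.inr rfl, Or.inl (by rw [hx]; congr 1 <;> ring)⟩
    · exact ⟨c + k, k, by omega, by omega, by omega, Or.inr rfl, Or.inr (by rw [hx]; congr 1 <;> ring)⟩
  · rintro ⟨c', k, hk, h1, h8, (rfl | rfl), (rfl | rfl)⟩
    · exact Or.inl (Or.inl (Or.inl ⟨k, by omega, by omega, by congr 1 <;> ring⟩))
    · exact Or.inl (Or.inl (Or.inr ⟨k, by omega, by omega, by congr 1 <;> ring⟩))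
    · exact Or.inl (Or.inr ⟨k, by omega, by omega, by congr 1 <;> ring⟩)
    · exact Or.inr ⟨k, by omega, by omega, by congr 1 <;> ring⟩

-- A's membership test equals B's closed-form predicate, for a nonempty pawn string
lemma core (b0 : Char) (ha : 'a' ≤ b0) (hh : b0 ≤ 'h') (r : Int) (p0 : Char) (t : List Char) :
    decide ((p0 :: t) ∈ pvLoopA 9 1 (-1) 9 ((b0.toNat : Int) - 96) r
        (pvLoopA 9 1 1 9 ((b0.toNat : Int) - 96) r
          (pvLoopA 9 (-1) (-1) 0 ((b0.toNat : Int) - 96) r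
            (pvLoopA 9 (-1) 1 0 ((b0.toNat : Int) - 96) r [])))) =
    (if ('a' ≤ p0 ∧ p0 ≤ 'h') ∧ p0 ≠ b0 then
       decide (t = PySem.Int.toChars (r + |(p0.toNat : Int) - (b0.toNat : Int)|)) ||
       decide (t = PySem.Int.toChars (r - |(p0.toNat : Int) - (b0.toNat : Int)|))
     else false) := by
  have ha97 : ('a' : Char).toNat = 97 := rfl
  have hh104 : ('h' : Char).toNat = 104 := rfl
  have hb0 : 97 ≤ b0.toNat ∧ b0.toNat ≤ 104 := by
    rw [char_le_iff, ha97] at ha; rw [char_le_iff, hh104] at hh; exact ⟨ha, hh⟩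
  set c : Int := (b0.toNat : Int) - 96 with hc
  have hc1 : 1 ≤ c := by omega
  have hc8 : c ≤ 8 := by omega
  by_cases hcond : ('a' ≤ p0 ∧ p0 ≤ 'h') ∧ p0 ≠ b0
  · rw [if_pos hcond, ← Bool.decide_or, decide_eq_decide, mem_fields c r hc1 hc8]
    obtain ⟨⟨hpa, hph⟩, hpne⟩ := hcond
    have hp0 : 97 ≤ p0.toNat ∧ p0.toNat ≤ 104 := by
      rw [char_le_iff, ha97] at hpa; rw [char_le_iff, hh104] at hph; exact ⟨hpa, hph⟩
    have hne : p0.toNat ≠ b0.toNat := fun h => hpne ((char_eq_iff p0 b0).mpr h)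
    constructor
    · rintro ⟨c', k, hk, h1, h8, hck, (hx | hx)⟩ <;>
        obtain ⟨he, ht⟩ := List.cons_eq_cons.mp hx <;>
        (have he' : p0.toNat = ((c' + 96 : Int)).toNat := by
          rw [he, char_toNat_ofNat _ (by omega)]) <;>
        (have habs : |(p0.toNat : Int) - (b0.toNat : Int)| = k := by
          rw [abs_eq (by omega)]; omega) <;>
        [left; right] <;>
        · rw [habs]; exact ht
    · have hofnat : Char.ofNat ((p0.toNat : Int) - 96 + 96).toNat = p0 := by
        rw [show ((p0.toNat : Int) - 96 + 96).toNat = p0.toNat by omega, Char.ofNat_toNat]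
      have habsnn : 0 ≤ |(p0.toNat : Int) - (b0.toNat : Int)| := abs_nonneg _
      rcases abs_choice ((p0.toNat : Int) - (b0.toNat : Int)) with habs | habs <;>
        rintro (ht | ht) <;>
        refine ⟨(p0.toNat : Int) - 96, |(p0.toNat : Int) - (b0.toNat : Int)|, by omega, by omega,
          by omega, by omega, ?_⟩
      · exact Or.inl (by rw [pvSq, hofnat, ht])
      · exact Or.inr (by rw [pvSq, hofnat, ht])
      · exact Or.inl (by rw [pvSq, hofnat, ht])
      · exact Or.inr (by rw [pvSq, hofnat, ht])
  · rw [if_neg hcond]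
    simp only [decide_eq_false_iff_not]
    rw [mem_fields c r hc1 hc8]
    rintro ⟨c', k, hk, h1, h8, hck, (hx | hx)⟩ <;>
      obtain ⟨he, -⟩ := List.cons_eq_cons.mp hx <;>
      (have he' : p0.toNat = ((c' + 96 : Int)).toNat := by
        rw [he, char_toNat_ofNat _ (by omega)]) <;>
      exact hcond ⟨⟨by rw [char_le_iff, ha97]; omega, by rw [char_le_iff, hh104]; omega⟩,
        fun hEq => by rw [char_eq_iff] at hEq; omega⟩

-- the empty pawn string is in no field generated by A's loops
lemma nil_not_mem (c r : Int) (hc1 : 1 ≤ c) (hc8 : c ≤ 8) :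
    ([] : List Char) ∉ pvLoopA 9 1 (-1) 9 c r (pvLoopA 9 1 1 9 c r
      (pvLoopA 9 (-1) (-1) 0 c r (pvLoopA 9 (-1) 1 0 c r []))) := by
  rw [mem_fields c r hc1 hc8]
  rintro ⟨c', k, -, -, -, -, (hx | hx)⟩ <;> simp [pvSq] at hx

-- ===== VERDICT (by name: the statement is the Claim_ definition above) =====
theorem bishopAndPawn_spec : Claim_equal_bishopAndPawn := by
  intro bishop pawn hdom hpre
  unfold Spec_bishopAndPawn
  obtain ⟨hlen, hpre⟩ := hpre
  obtain ⟨b0, b1, rest, h⟩ : ∃ b0 b1 rest, bishop.toList = b0 :: b1 :: rest := by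
    cases hb : bishop.toList with
    | nil => rw [hb] at hlen; simp at hlen
    | cons x tl =>
      cases tl with
      | nil => rw [hb] at hlen; simp at hlen
      | cons y u => exact ⟨x, y, u, rfl⟩
  rw [h] at hpre
  simp only [List.getD_cons_zero, List.getD_cons_succ] at hpre
  obtain ⟨ha, hh, hdig⟩ := hpre
  obtain ⟨hg0, hg1⟩ := pyGet01 bishop b0 b1 rest h
  obtain ⟨r, hr⟩ := ofChars?_digit b1 hdig
  unfold bishopAndPawn bishopAndPawn_alt
  rw [hg0, hg1]
  simp only [hr]
  have hb0 : 97 ≤ b0.toNat ∧ b0.toNat ≤ 104 := by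
    rw [char_le_iff] at ha hh; exact ⟨ha, hh⟩
  cases hp : pawn.toList with
  | nil =>
    simp only [decide_eq_false_iff_not]
    exact fun hx => nil_not_mem _ r (by omega) (by omega) hx
  | cons p0 t =>
    exact core b0 ha hh r p0 t
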